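-- pv_equiv track=rewrite | github.com/fernandezfran/python_UNSAM | ejercicios/Clase06/secuencias_binarias.py | listar_secuencias
-- ===== SOURCE A (Python) =====
-- def incrementar(s):
--     carry = 1
--     l = len(s)
--
--     for i in range(l-1,-1,-1):
--         if (s[i] == 1 and carry == 1):
--             s[i] = 0
--             carry = 1
--         else:
--             s[i] = s[i] + carry
--             carry = 0
--     return s
--
-- def listar_secuencias(n):
--     """
--     devuelve una lista con todas las secuencias (listas) binarias de longitud n,
--     donde la primera es [0]*n y después utiliza la función incrementar.
--     """
--     l = []
--
--     s = [0] * n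
--     l.append(s.copy())
--     while (s != [1] * n):
--         s = incrementar(s)
--         l.append(s.copy())
--
--     return l
-- ===== SOURCE B (Python) =====
-- def listar_secuencias(n):
--     """
--     devuelve una lista con todas las secuencias (listas) binarias de longitud n,
--     en orden ascendente; construida recursivamente en vez de con un contador
--     con acarreo.
--     """
--     if n <= 0:
--         return [[]]
--     prev = listar_secuencias(n - 1)
--     return [[b] + rest for b in (0, 1) for rest in prev]
-- ===== Notes on version B (the rewrite author's own statement) =====
-- stated objective: simpler
-- what changed: Replaced the imperative counter that repeatedly carry-propagates an increment across a mutable bit list with a short structural recursion: the sequences of one length are both bits prefixed to the sequences of the next shorter length.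
import Mathlib
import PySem

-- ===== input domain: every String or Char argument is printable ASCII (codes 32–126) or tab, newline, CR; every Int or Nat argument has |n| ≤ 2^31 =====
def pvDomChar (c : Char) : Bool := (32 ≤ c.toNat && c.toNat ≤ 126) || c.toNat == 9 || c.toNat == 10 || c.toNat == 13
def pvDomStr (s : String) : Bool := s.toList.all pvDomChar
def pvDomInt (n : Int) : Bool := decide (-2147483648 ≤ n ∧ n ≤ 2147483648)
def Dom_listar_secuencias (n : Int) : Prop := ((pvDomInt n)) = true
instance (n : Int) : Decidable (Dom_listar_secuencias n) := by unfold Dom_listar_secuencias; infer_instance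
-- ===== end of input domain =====

-- B replaces A's carry-propagating mutable counter loop with a short structural
-- recursion (each sequence list is both bits prefixed to the shorter sequences);
-- same return value, chosen for simplicity, not speed.


-- ===== PORT A =====
-- one iteration of incrementar's `for i in range(l-1,-1,-1)` body; the indices
-- produced by that range are always valid for s, so pyGetD/pySetD are exact here
def incStep (st : List Int × Int) (i : Int) : List Int × Int :=
  if PySem.List.pyGetD st.1 i 0 = 1 ∧ st.2 = 1 then
    (PySem.List.pySetD st.1 i 0, 1)
  else
    (PySem.List.pySetD st.1 i (PySem.List.pyGetD st.1 i 0 + st.2), 0)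

def incrementar (s : List Int) : List Int :=
  ((PySem.List.pyRange ((s.length : Int) - 1) (-1) (-1)).foldl incStep (s, 1)).1

-- the `while s != [1]*n` loop; fuel 2^n bounds its iteration count (totality only)
def loopA : Nat → Nat → List Int → List (List Int) → List (List Int)
  | 0, _, _, l => l
  | f + 1, k, s, l =>
    if s = List.replicate k 1 then l
    else
      let s' := incrementar s
      loopA f k s' (l ++ [s'])

def listar_secuencias (n : Int) : List (List Int) :=
  let s := List.replicate n.toNat 0   -- [0] * n  (empty for n ≤ 0)
  loopA (2 ^ n.toNat) n.toNat s [s]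

-- ===== PORT B =====
def goB : Nat → List (List Int)
  | 0 => [[]]
  | k + 1 => (goB k).map (fun rest => 0 :: rest) ++ (goB k).map (fun rest => 1 :: rest)

def listar_secuencias_alt (n : Int) : List (List Int) :=
  if n ≤ 0 then [[]] else goB n.toNat

-- ===== PRECONDITION & SPEC =====
def Spec_listar_secuencias (n : Int) (out : List (List Int)) : Prop := out = listar_secuencias_alt n
instance (n : Int) (out : List (List Int)) : Decidable (Spec_listar_secuencias n out) := by unfold Spec_listar_secuencias; infer_instance

-- ===== CLAIM (what is proved, stated in full; the proofs are below) =====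
def Claim_equal_listar_secuencias : Prop := ∀ (n : Int), Dom_listar_secuencias n → Spec_listar_secuencias n (listar_secuencias n)

-- ===== LEMMAS AND PROOFS =====

-- the k-bit big-endian encoding of v (LSB appended last)
def encA : Nat → Nat → List Int
  | 0, _ => []
  | k + 1, v => encA k (v / 2) ++ [((v % 2 : Nat) : Int)]

theorem length_encA (k v : Nat) : (encA k v).length = k := by
  induction k generalizing v with
  | zero => rfl
  | succ k ih => simp [encA, ih]

theorem incStep_carry0 (s : List Int) (i : Int) (h0 : 0 ≤ i) (h1 : i < (s.length : Int)) :
    incStep (s, 0) i = (s, 0) := by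
  obtain ⟨j, rfl⟩ := Int.eq_ofNat_of_zero_le h0
  have hj : j < s.length := by exact_mod_cast h1
  simp [incStep, List.getD, List.getElem?_eq_getElem hj, List.set_getElem_self hj]

theorem foldl_carry0 (idxs : List Int) (s : List Int)
    (h : ∀ i ∈ idxs, 0 ≤ i ∧ i < (s.length : Int)) :
    idxs.foldl incStep (s, 0) = (s, 0) := by
  induction idxs with
  | nil => rfl
  | cons i t ih =>
    obtain ⟨h0, h1⟩ := h i (by simp)
    simp only [List.foldl_cons, incStep_carry0 s i h0 h1]
    exact ih fun j hj => h j (by simp [hj])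

theorem incStep_append (xs : List Int) (c carry : Int) (i : Int)
    (h0 : 0 ≤ i) (h1 : i < (xs.length : Int)) :
    incStep (xs ++ [c], carry) i =
      ((incStep (xs, carry) i).1 ++ [c], (incStep (xs, carry) i).2) := by
  obtain ⟨j, rfl⟩ := Int.eq_ofNat_of_zero_le h0
  have hj : j < xs.length := by exact_mod_cast h1
  simp only [incStep, PySem.List.pyGetD_natCast, PySem.List.pySetD_natCast,
    List.getD, List.getElem?_append_left hj, List.set_append_left _ _ hj]
  split_ifs <;> rfl

theorem length_incStep (st : List Int × Int) (i : Int) : (incStep st i).1.length = st.1.length := by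
  unfold incStep
  split_ifs <;> simp [PySem.List.length_pySetD]

theorem foldl_append (idxs : List Int) (xs : List Int) (c carry : Int)
    (h : ∀ i ∈ idxs, 0 ≤ i ∧ i < (xs.length : Int)) :
    idxs.foldl incStep (xs ++ [c], carry) =
      ((idxs.foldl incStep (xs, carry)).1 ++ [c], (idxs.foldl incStep (xs, carry)).2) := by
  induction idxs generalizing xs carry with
  | nil => rfl
  | cons i t ih =>
    obtain ⟨h0, h1⟩ := h i (by simp)
    simp only [List.foldl_cons, incStep_append xs c carry i h0 h1]
    have hlen : ((incStep (xs, carry) i).1.length : Int) = (xs.length : Int) := by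
      exact_mod_cast congrArg Nat.cast (length_incStep (xs, carry) i)
    have := ih (incStep (xs, carry) i).1 (incStep (xs, carry) i).2
      (fun j hj => by rw [hlen]; exact h j (by simp [hj]))
    rw [this]

theorem inc_append_zero (xs : List Int) : incrementar (xs ++ [0]) = xs ++ [1] := by
  unfold incrementar
  have hlen : ((xs ++ [(0 : Int)]).length : Int) - 1 = (xs.length : Int) := by simp
  rw [hlen, PySem.List.pyRange_neg_one_cons (by omega)]
  have hset : ∀ v : Int, (xs ++ [(0 : Int)]).set xs.length v = xs ++ [v] := by
    intro v; rw [List.set_append_right _ _ (le_refl _)]; simp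
  have hstep : incStep (xs ++ [0], 1) (xs.length : Int) = (xs ++ [1], 0) := by
    simp [incStep, List.getD, hset]
  rw [List.foldl_cons, hstep, foldl_carry0]
  intro i hi
  rw [PySem.List.mem_pyRange_neg_one] at hi
  simp only [List.length_append, List.length_cons, List.length_nil]
  push_cast
  omega

theorem inc_append_one (xs : List Int) : incrementar (xs ++ [1]) = incrementar xs ++ [0] := by
  unfold incrementar
  have hlen : ((xs ++ [(1 : Int)]).length : Int) - 1 = (xs.length : Int) := by simp
  rw [hlen, PySem.List.pyRange_neg_one_cons (by omega)]
  have hset : ∀ v : Int, (xs ++ [(1 : Int)]).set xs.length v = xs ++ [v] := by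
    intro v; rw [List.set_append_right _ _ (le_refl _)]; simp
  have hstep : incStep (xs ++ [1], 1) (xs.length : Int) = (xs ++ [0], 1) := by
    simp [incStep, List.getD, hset]
  rw [List.foldl_cons, hstep, foldl_append]
  intro i hi
  rw [PySem.List.mem_pyRange_neg_one] at hi
  omega

theorem inc_encA (k v : Nat) (h : v + 1 < 2 ^ k) : incrementar (encA k v) = encA k (v + 1) := by
  induction k generalizing v with
  | zero => omega
  | succ k ih =>
    have h2 : 2 ^ (k + 1) = 2 * 2 ^ k := by ring
    rcases Nat.mod_two_eq_zero_or_one v with he | he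
    · have hd : (v + 1) / 2 = v / 2 ∧ (v + 1) % 2 = 1 := by omega
      rw [encA, he, encA, hd.1, hd.2]
      exact_mod_cast inc_append_zero (encA k (v / 2))
    · have hd : (v + 1) / 2 = v / 2 + 1 ∧ (v + 1) % 2 = 0 := by omega
      have hlt : v / 2 + 1 < 2 ^ k := by omega
      rw [encA, he, encA, hd.1, hd.2]
      have := inc_append_one (encA k (v / 2))
      norm_num at this ⊢
      rw [this, ih (v / 2) hlt]

theorem encA_ones (k : Nat) : encA k (2 ^ k - 1) = List.replicate k 1 := by
  induction k with
  | zero => rfl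
  | succ k ih =>
    have h1 : 1 ≤ 2 ^ k := Nat.one_le_two_pow
    have h2 : 2 ^ (k + 1) = 2 * 2 ^ k := by ring
    have hd : (2 ^ (k + 1) - 1) / 2 = 2 ^ k - 1 ∧ (2 ^ (k + 1) - 1) % 2 = 1 := by omega
    rw [encA, hd.1, hd.2, ih, List.replicate_succ']
    rfl

theorem encA_eq_ones (k v : Nat) (hv : v < 2 ^ k) (h : encA k v = List.replicate k 1) :
    v = 2 ^ k - 1 := by
  induction k generalizing v with
  | zero => omega
  | succ k ih =>
    have h1 : 1 ≤ 2 ^ k := Nat.one_le_two_pow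
    have h2 : 2 ^ (k + 1) = 2 * 2 ^ k := by ring
    rw [encA, List.replicate_succ'] at h
    obtain ⟨ha, hb⟩ := List.append_inj h (by simp [length_encA])
    have hm : v % 2 = 1 := by
      have : ((v % 2 : Nat) : Int) = 1 := by simpa using hb
      exact_mod_cast this
    have := ih (v / 2) (by omega) ha
    omega

theorem encA_zero (k : Nat) : encA k 0 = List.replicate k 0 := by
  induction k with
  | zero => rfl
  | succ k ih => rw [encA, Nat.zero_div, ih, List.replicate_succ']; rfl

theorem loopA_run (k : Nat) : ∀ (f v : Nat) (l : List (List Int)), v < 2 ^ k → 2 ^ k - 1 - v ≤ f →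
    loopA f k (encA k v) l = l ++ (List.range (2 ^ k - 1 - v)).map (fun i => encA k (v + 1 + i)) := by
  intro f
  induction f with
  | zero =>
    intro v l hv hf
    rw [show 2 ^ k - 1 - v = 0 from by omega]
    simp [loopA]
  | succ f ih =>
    intro v l hv hf
    by_cases hv1 : v = 2 ^ k - 1
    · subst hv1
      rw [encA_ones]
      simp [loopA]
    · have h1 : 1 ≤ 2 ^ k := Nat.one_le_two_pow
      have hlt : v + 1 < 2 ^ k := by omega
      have hne : encA k v ≠ List.replicate k 1 := fun hc => hv1 (encA_eq_ones k v hv hc)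
      calc loopA (f + 1) k (encA k v) l
          = loopA f k (encA k (v + 1)) (l ++ [encA k (v + 1)]) := by
            simp only [loopA, if_neg hne, inc_encA k v hlt]
        _ = (l ++ [encA k (v + 1)]) ++
              (List.range (2 ^ k - 1 - (v + 1))).map (fun i => encA k (v + 1 + 1 + i)) :=
            ih (v + 1) _ hlt (by omega)
        _ = l ++ (List.range (2 ^ k - 1 - v)).map (fun i => encA k (v + 1 + i)) := by
            rw [List.append_assoc]
            congr 1
            rw [show 2 ^ k - 1 - v = (2 ^ k - 1 - (v + 1)) + 1 from by omega,
              List.range_succ_eq_map]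
            simp only [List.map_cons, List.map_map, List.singleton_append]
            congr 1
            apply List.map_congr_left
            intro a _
            simp only [Function.comp_apply]
            congr 1
            omega

theorem encA_cons (k : Nat) : ∀ v : Nat, v < 2 ^ (k + 1) →
    encA (k + 1) v = ((v / 2 ^ k : Nat) : Int) :: encA k (v % 2 ^ k) := by
  induction k with
  | zero =>
    intro v hv
    interval_cases v <;> rfl
  | succ k ih =>
    intro v hv
    have h2 : 2 ^ (k + 2) = 2 * 2 ^ (k + 1) := by ring
    have h2' : 2 ^ (k + 1) = 2 * 2 ^ k := by ring
    have e1 : v / 2 / 2 ^ k = v / 2 ^ (k + 1) := by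
      rw [Nat.div_div_eq_div_mul, ← h2']
    have e2 : v % 2 ^ (k + 1) / 2 = v / 2 % 2 ^ k := by
      rw [h2']; exact Nat.mod_mul_right_div_self v 2 (2 ^ k)
    have e3 : v % 2 ^ (k + 1) % 2 = v % 2 := Nat.mod_mod_of_dvd v ⟨2 ^ k, h2'⟩
    rw [show k + 1 + 1 = k + 2 from rfl, encA, ih (v / 2) (by omega), encA, e1, e2, e3]
    rfl

theorem goB_eq (k : Nat) : goB k = (List.range (2 ^ k)).map (encA k) := by
  induction k with
  | zero => rfl
  | succ k ih =>
    have h1 : 1 ≤ 2 ^ k := Nat.one_le_two_pow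
    rw [goB, ih, show 2 ^ (k + 1) = 2 ^ k + 2 ^ k from by ring, List.range_add,
      List.map_append, List.map_map, List.map_map]
    congr 1
    · apply List.map_congr_left
      intro v hv
      rw [List.mem_range] at hv
      simp only [Function.comp_apply]
      rw [encA_cons k v (by omega), Nat.div_eq_of_lt hv, Nat.mod_eq_of_lt hv]
      rfl
    · rw [List.map_map]
      apply List.map_congr_left
      intro v hv
      rw [List.mem_range] at hv
      simp only [Function.comp_apply]
      rw [encA_cons k (2 ^ k + v) (by omega)]
      rw [show 2 ^ k + v = v + 2 ^ k from by omega, Nat.add_div_right v h1,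
        Nat.add_mod_right v (2 ^ k), Nat.div_eq_of_lt hv, Nat.mod_eq_of_lt hv]
      rfl

theorem a_eq_go (k : Nat) : loopA (2 ^ k) k (List.replicate k 0) [List.replicate k 0] = goB k := by
  have h1 : 1 ≤ 2 ^ k := Nat.one_le_two_pow
  rw [← encA_zero, loopA_run k (2 ^ k) 0 [encA k 0] h1 (by omega), goB_eq,
    show 2 ^ k = (2 ^ k - 1) + 1 from by omega, List.range_succ_eq_map, List.map_cons,
    List.map_map]
  rw [show (2 ^ k - 1) + 1 - 1 - 0 = 2 ^ k - 1 from by omega]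
  simp only [List.cons_append, List.nil_append]
  congr 1
  apply List.map_congr_left
  intro i _
  simp only [Function.comp_apply]
  congr 1
  omega

-- ===== VERDICT (by name: the statement is the Claim_ definition above) =====
theorem listar_secuencias_spec : Claim_equal_listar_secuencias := by
  intro n _
  show listar_secuencias n = listar_secuencias_alt n
  unfold listar_secuencias listar_secuencias_alt
  by_cases h : n ≤ 0
  · simp [Int.toNat_of_nonpos h, loopA, h]
  · simp only [a_eq_go, if_neg h]
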